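-- pv_equiv track=rewrite | github.com/mturann/chess-app | pages/Ongoing Game.py | format_moves_display
-- ===== SOURCE A (Python) =====
-- def format_moves_display(moves_san, current_index):
--     """Format moves for display with current move highlighted"""
--     html = '<div style="font-family: monospace; line-height: 2; color: #f0f0f0;">'
--
--     for i in range(0, len(moves_san), 2):
--         move_num = i // 2 + 1
--         html += f'<span style="color: #aaa; margin-right: 5px;">{move_num}.</span>'
--
--         # White's move
--         if current_index == i + 1:
--             html += f'<span class="move-current">{moves_san[i]}</span> '
--         else:
--             html += f'<span class="move-item">{moves_san[i]}</span> '
--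
--         # Black's move
--         if i + 1 < len(moves_san):
--             if current_index == i + 2:
--                 html += f'<span class="move-current">{moves_san[i+1]}</span> '
--             else:
--                 html += f'<span class="move-item">{moves_san[i+1]}</span> '
--
--         html += '&nbsp;&nbsp;'
--
--     html += '</div>'
--     return html
-- ===== SOURCE B (Python) =====
-- def format_moves_display(moves_san, current_index):
--     """Format moves for display with current move highlighted"""
--     parts = ['<div style="font-family: monospace; line-height: 2; color: #f0f0f0;">']
--     last = len(moves_san) - 1
--     for j, s in enumerate(moves_san):
--         if j % 2 == 0:
--             parts.append(f'<span style="color: #aaa; margin-right: 5px;">{j // 2 + 1}.</span>')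
--         cls = 'move-current' if current_index == j + 1 else 'move-item'
--         parts.append(f'<span class="{cls}">{s}</span> ')
--         if j % 2 == 1 or j == last:
--             parts.append('&nbsp;&nbsp;')
--     parts.append('</div>')
--     return ''.join(parts)
-- ===== Notes on version B (the rewrite author's own statement) =====
-- stated objective: alternative
-- what changed: B replaces A's pairwise range(0,n,2) string-concatenation loop (which indexes moves_san[i], moves_san[i+1] and re-tests bounds) with a single enumerate pass that appends fragments to a list -- number span on even indices, separator after odd indices or the final element -- joined once at the end.
import Mathlib
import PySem

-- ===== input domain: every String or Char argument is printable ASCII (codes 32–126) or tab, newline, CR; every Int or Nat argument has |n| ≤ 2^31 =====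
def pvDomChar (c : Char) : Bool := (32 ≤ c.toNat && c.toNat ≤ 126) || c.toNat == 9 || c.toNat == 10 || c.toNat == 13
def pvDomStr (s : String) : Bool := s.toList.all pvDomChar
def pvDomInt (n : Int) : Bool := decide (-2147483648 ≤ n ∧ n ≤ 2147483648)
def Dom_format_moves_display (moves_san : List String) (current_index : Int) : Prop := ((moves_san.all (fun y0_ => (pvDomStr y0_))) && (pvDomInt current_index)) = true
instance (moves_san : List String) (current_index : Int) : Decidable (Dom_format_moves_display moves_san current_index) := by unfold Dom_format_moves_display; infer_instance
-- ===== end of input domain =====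

-- B rebuilds the same highlighted-move HTML in one enumerate pass collecting fragments into a list
-- (number span on even indices, separator after odd indices or the last element) joined at the end;
-- objective: alternative decomposition, same cost.

-- ===== PORT A =====
-- pyGetD with default "" is exact here: every index A reads is in range.
def format_moves_display (moves_san : List String) (current_index : Int) : String :=
  ((PySem.List.pyRange 0 (PySem.List.len moves_san) 2).foldl (fun html i =>
    let html := html ++ "<span style=\"color: #aaa; margin-right: 5px;\">" ++ PySem.Int.toStr (PySem.Int.floordiv i 2 + 1) ++ ".</span>"
    let html := if current_index == i + 1 then
        html ++ "<span class=\"move-current\">" ++ PySem.List.pyGetD moves_san i "" ++ "</span> "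
      else
        html ++ "<span class=\"move-item\">" ++ PySem.List.pyGetD moves_san i "" ++ "</span> "
    let html := if i + 1 < PySem.List.len moves_san then
        (if current_index == i + 2 then
          html ++ "<span class=\"move-current\">" ++ PySem.List.pyGetD moves_san (i + 1) "" ++ "</span> "
        else
          html ++ "<span class=\"move-item\">" ++ PySem.List.pyGetD moves_san (i + 1) "" ++ "</span> ")
      else html
    html ++ "&nbsp;&nbsp;")
    "<div style=\"font-family: monospace; line-height: 2; color: #f0f0f0;\">") ++ "</div>"

-- ===== PORT B =====
-- Source B's 'last = len(moves_san) - 1' is inlined at its single use site.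
def format_moves_display_alt (moves_san : List String) (current_index : Int) : String :=
  PySem.Str.join ""
    ((["<div style=\"font-family: monospace; line-height: 2; color: #f0f0f0;\">"] |>
      (PySem.List.enumerate moves_san 0).foldl (fun parts js =>
        let parts := if PySem.Int.mod js.1 2 == 0 then
            parts ++ ["<span style=\"color: #aaa; margin-right: 5px;\">" ++ PySem.Int.toStr (PySem.Int.floordiv js.1 2 + 1) ++ ".</span>"]
          else parts
        let cls := if current_index == js.1 + 1 then "move-current" else "move-item"
        let parts := parts ++ ["<span class=\"" ++ cls ++ "\">" ++ js.2 ++ "</span> "]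
        if PySem.Int.mod js.1 2 == 1 || js.1 == PySem.List.len moves_san - 1 then parts ++ ["&nbsp;&nbsp;"] else parts))
      ++ ["</div>"])

-- ===== PRECONDITION & SPEC =====
def Spec_format_moves_display (moves_san : List String) (current_index : Int) (out : String) : Prop := out = format_moves_display_alt moves_san current_index
instance (moves_san : List String) (current_index : Int) (out : String) : Decidable (Spec_format_moves_display moves_san current_index out) := by unfold Spec_format_moves_display; infer_instance

-- ===== CLAIM (what is proved, stated in full; the proofs are below) =====
def Claim_equal_format_moves_display : Prop := ∀ (moves_san : List String) (current_index : Int), Dom_format_moves_display moves_san current_index → Spec_format_moves_display moves_san current_index (format_moves_display moves_san current_index)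

-- ===== LEMMAS AND PROOFS =====

-- the move-number span at even absolute index j
def pvNumSpan (j : Int) : String :=
  "<span style=\"color: #aaa; margin-right: 5px;\">" ++ PySem.Int.toStr (PySem.Int.floordiv j 2 + 1) ++ ".</span>"

-- the span for the move at absolute index j
def pvMvSpan (ci j : Int) (s : String) : String :=
  if ci == j + 1 then "<span class=\"move-current\">" ++ s ++ "</span> "
  else "<span class=\"move-item\">" ++ s ++ "</span> "

-- the common rendering of a suffix of the move list starting at even absolute index j
def pvChunk (ci : Int) (j : Int) : List String → String
  | [] => ""
  | [x] => pvNumSpan j ++ pvMvSpan ci j x ++ "&nbsp;&nbsp;"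
  | x :: y :: rest =>
      pvNumSpan j ++ pvMvSpan ci j x ++ pvMvSpan ci (j + 1) y ++ "&nbsp;&nbsp;" ++ pvChunk ci (j + 2) rest

-- what one iteration of A's loop appends
def pvGA (l : List String) (ci k : Int) : String :=
  pvNumSpan k ++ pvMvSpan ci k (PySem.List.pyGetD l k "") ++
  (if k + 1 < PySem.List.len l then pvMvSpan ci (k + 1) (PySem.List.pyGetD l (k + 1) "") else "") ++
  "&nbsp;&nbsp;"

-- what one iteration of B's loop appends
def pvGB (l : List String) (ci : Int) (js : Int × String) : List String :=
  (if PySem.Int.mod js.1 2 == 0 then [pvNumSpan js.1] else []) ++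
  [pvMvSpan ci js.1 js.2] ++
  (if PySem.Int.mod js.1 2 == 1 || js.1 == PySem.List.len l - 1 then ["&nbsp;&nbsp;"] else [])

theorem pvInterNil (xs : List (List Char)) : List.intercalate ([] : List Char) xs = xs.flatten := by
  induction xs with
  | nil => simp [List.intercalate]
  | cons h t ih =>
      cases t with
      | nil => simp [List.intercalate]
      | cons h2 t2 =>
          simp only [List.intercalate, List.intersperse] at ih ⊢
          simp_all

theorem pvJoin_append (a b : List String) :
    PySem.Str.join "" (a ++ b) = PySem.Str.join "" a ++ PySem.Str.join "" b := by
  rw [← String.toList_inj, String.toList_append, PySem.Str.toList_join, PySem.Str.toList_join, PySem.Str.toList_join]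
  simp only [show "".toList = ([] : List Char) from rfl, PySem.Chars.join, List.map_append, pvInterNil, List.flatten_append]

theorem pvJoin_singleton (x : String) : PySem.Str.join "" [x] = x := by
  rw [← String.toList_inj, PySem.Str.toList_join]
  simp [PySem.Chars.join, List.intercalate]

theorem pvJoin_nil : PySem.Str.join "" ([] : List String) = "" := rfl

theorem pvJoin_cons (x : String) (t : List String) :
    PySem.Str.join "" (x :: t) = x ++ PySem.Str.join "" t := by
  rw [show x :: t = [x] ++ t from rfl, pvJoin_append, pvJoin_singleton]

theorem pvFoldl_str (g : Int → String) (r : List Int) : ∀ (acc : String),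
    r.foldl (fun a k => a ++ g k) acc = acc ++ PySem.Str.join "" (r.map g) := by
  induction r with
  | nil => intro acc; simp [PySem.Str.join, PySem.Chars.join, List.intercalate]
  | cons h t ih =>
      intro acc
      simp only [List.foldl_cons, List.map_cons, pvJoin_cons, ih, String.append_assoc]

theorem pvRange_two_nil (a b : Int) (h : b ≤ a) : PySem.List.pyRange a b 2 = [] := by
  rw [PySem.List.pyRange_of_pos _ _ (by norm_num)]
  rw [if_neg (by omega)]
  simp

theorem pvRange_two_cons (a b : Int) (h : a < b) :
    PySem.List.pyRange a b 2 = a :: PySem.List.pyRange (a + 2) b 2 := by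
  rw [PySem.List.pyRange_of_pos _ _ (by norm_num), PySem.List.pyRange_of_pos _ _ (by norm_num)]
  rw [if_pos h]
  by_cases h2 : a + 2 < b
  · rw [if_pos h2]
    have hn : ((b - a + 2 - 1) / 2).toNat = ((b - (a + 2) + 2 - 1) / 2).toNat + 1 := by omega
    rw [hn, List.range_succ_eq_map]
    simp only [List.map_cons, List.map_map]
    congr 1
    · norm_num
    · apply List.map_congr_left
      intro k _
      simp only [Function.comp]
      push_cast
      ring
  · rw [if_neg h2]
    have hn : ((b - a + 2 - 1) / 2).toNat = 1 := by omega
    rw [hn]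
    simp

-- A's loop body appends pvGA
theorem pvBodyA (l : List String) (ci : Int) :
    (fun (html : String) (i : Int) =>
      let html := html ++ "<span style=\"color: #aaa; margin-right: 5px;\">" ++ PySem.Int.toStr (PySem.Int.floordiv i 2 + 1) ++ ".</span>"
      let html := if ci == i + 1 then
          html ++ "<span class=\"move-current\">" ++ PySem.List.pyGetD l i "" ++ "</span> "
        else
          html ++ "<span class=\"move-item\">" ++ PySem.List.pyGetD l i "" ++ "</span> "
      let html := if i + 1 < PySem.List.len l then
          (if ci == i + 2 then
            html ++ "<span class=\"move-current\">" ++ PySem.List.pyGetD l (i + 1) "" ++ "</span> "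
          else
            html ++ "<span class=\"move-item\">" ++ PySem.List.pyGetD l (i + 1) "" ++ "</span> ")
        else html
      html ++ "&nbsp;&nbsp;") = fun html i => html ++ pvGA l ci i := by
  funext a k
  simp only [pvGA, pvNumSpan, pvMvSpan]
  rw [show (k + 1 + 1 : Int) = k + 2 from by ring]
  split_ifs <;> simp only [String.append_assoc, String.append_empty]

-- B's loop body appends pvGB
theorem pvBodyB (l : List String) (ci : Int) :
    (fun (parts : List String) (js : Int × String) =>
      let parts := if PySem.Int.mod js.1 2 == 0 then
          parts ++ ["<span style=\"color: #aaa; margin-right: 5px;\">" ++ PySem.Int.toStr (PySem.Int.floordiv js.1 2 + 1) ++ ".</span>"]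
        else parts
      let cls := if ci == js.1 + 1 then "move-current" else "move-item"
      let parts := parts ++ ["<span class=\"" ++ cls ++ "\">" ++ js.2 ++ "</span> "]
      if PySem.Int.mod js.1 2 == 1 || js.1 == PySem.List.len l - 1 then parts ++ ["&nbsp;&nbsp;"] else parts)
    = fun parts js => parts ++ pvGB l ci js := by
  funext parts js
  simp only [pvGB, pvNumSpan, pvMvSpan]
  split_ifs <;>
    (try rw [show ("<span class=\"" ++ "move-current" : String) = "<span class=\"move-current" from by decide,
             show ("<span class=\"move-current" ++ "\">" : String) = "<span class=\"move-current\">" from by decide]) <;>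
    (try rw [show ("<span class=\"" ++ "move-item" : String) = "<span class=\"move-item" from by decide,
             show ("<span class=\"move-item" ++ "\">" : String) = "<span class=\"move-item\">" from by decide]) <;>
    simp only [List.append_assoc, List.singleton_append, List.nil_append, List.append_nil]

theorem pvBeq_false {a b : Int} (h : a ≠ b) : (a == b) = false := by
  simp [h]

theorem pvBeq_true {a b : Int} (h : a = b) : (a == b) = true := by
  simp [h]

theorem pvMod_even {j : Int} (h : 2 ∣ j) : PySem.Int.mod j 2 = 0 := by
  simp [PySem.Int.mod, Int.fmod_eq_emod]
  omega

theorem pvMod_odd {j : Int} (h : 2 ∣ j) : PySem.Int.mod (j + 1) 2 = 1 := by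
  simp [PySem.Int.mod, Int.fmod_eq_emod]
  omega

theorem pvGB_even (l : List String) (ci j : Int) (x : String)
    (h0 : PySem.Int.mod j 2 = 0) (hne : j ≠ PySem.List.len l - 1) :
    pvGB l ci (j, x) = [pvNumSpan j, pvMvSpan ci j x] := by
  unfold pvGB
  dsimp only
  rw [h0, pvBeq_false hne]
  simp

theorem pvGB_odd (l : List String) (ci j : Int) (x : String)
    (h1 : PySem.Int.mod j 2 = 1) :
    pvGB l ci (j, x) = [pvMvSpan ci j x, "&nbsp;&nbsp;"] := by
  unfold pvGB
  dsimp only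
  rw [h1]
  simp

theorem pvGB_last (l : List String) (ci j : Int) (x : String)
    (h0 : PySem.Int.mod j 2 = 0) (hl : j = PySem.List.len l - 1) :
    pvGB l ci (j, x) = [pvNumSpan j, pvMvSpan ci j x, "&nbsp;&nbsp;"] := by
  unfold pvGB
  dsimp only
  rw [pvBeq_true hl, h0]
  simp

-- A's appended fragments over the even indices of the suffix concatenate to pvChunk
theorem pvChunkA (t l : List String) (ci i : Int) (hi : 0 ≤ i) (hd : l.drop i.toNat = t) :
    PySem.Str.join "" ((PySem.List.pyRange i (PySem.List.len l) 2).map (pvGA l ci)) = pvChunk ci i t := by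
  match t with
  | [] =>
      have hlen : l.length ≤ i.toNat := by
        by_contra hc
        push Not at hc
        have : l.drop i.toNat ≠ [] := by
          simp [List.drop_eq_nil_iff]
          omega
        exact this hd
      rw [pvRange_two_nil _ _ (by simp [PySem.List.len]; omega)]
      simp [pvChunk, PySem.Str.join, PySem.Chars.join, List.intercalate]
  | [x] =>
      have hlt : i.toNat < l.length := by
        by_contra hc
        push Not at hc
        rw [List.drop_eq_nil_iff.mpr hc] at hd
        exact (by simp at hd)
      have hlen : l.length = i.toNat + 1 := by
        have := congrArg List.length hd
        simp [List.length_drop] at this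
        omega
      have hx : l[i.toNat] = x := by
        have : (l.drop i.toNat)[0]'(by rw [hd]; simp) = x := by simp [hd]
        simpa using this
      have hn : (PySem.List.len l : Int) = i + 1 := by
        simp [PySem.List.len, hlen]
        omega
      rw [hn, pvRange_two_cons _ _ (by omega), pvRange_two_nil _ _ (by omega)]
      simp only [List.map_cons, List.map_nil, pvJoin_cons]
      rw [show PySem.Str.join "" [] = "" from rfl]
      unfold pvGA
      rw [if_neg (by omega)]
      rw [PySem.List.pyGetD_eq_getElem l "" hi (by omega), hx]
      simp only [pvChunk, String.append_assoc, String.append_empty]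
  | x :: y :: rest =>
      have hlt : i.toNat + 1 < l.length := by
        have := congrArg List.length hd
        simp [List.length_drop] at this
        omega
      have hlen : l.length = i.toNat + 2 + rest.length := by
        have := congrArg List.length hd
        simp [List.length_drop] at this
        omega
      have hx : l[i.toNat] = x := by
        have : (l.drop i.toNat)[0]'(by rw [hd]; simp) = x := by simp [hd]
        simpa using this
      have hy : l[i.toNat + 1] = y := by
        have : (l.drop i.toNat)[1]'(by rw [hd]; simp) = y := by simp [hd]
        simpa using this
      have hd2 : l.drop (i + 2).toNat = rest := by
        have h4 := congrArg (List.drop 2) hd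
        rw [List.drop_drop] at h4
        simp only [List.drop_succ_cons, List.drop_zero] at h4
        convert h4 using 2
        omega
      have ih := pvChunkA rest l ci (i + 2) (by omega) hd2
      rw [pvRange_two_cons _ _ (by simp [PySem.List.len]; omega)]
      simp only [List.map_cons, pvJoin_cons, ih]
      unfold pvGA
      rw [if_pos (by simp [PySem.List.len]; omega)]
      have hgy : PySem.List.pyGetD l (i + 1) "" = y := by
        rw [PySem.List.pyGetD_eq_getElem l "" (by omega) (by omega)]
        have he : (i + 1).toNat = i.toNat + 1 := by omega
        simp only [he]
        exact hy
      rw [PySem.List.pyGetD_eq_getElem l "" hi (by omega), hx, hgy]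
      simp only [pvChunk, String.append_assoc]
termination_by t.length

-- B's appended fragments over the enumerated suffix concatenate to pvChunk
theorem pvChunkB (t l : List String) (ci j : Int) (hj : 0 ≤ j) (hev : 2 ∣ j)
    (hd : l.drop j.toNat = t) :
    PySem.Str.join "" ((PySem.List.enumerate t j).flatMap (pvGB l ci)) = pvChunk ci j t := by
  match t with
  | [] =>
      simp [PySem.List.enumerate_nil, pvChunk, PySem.Str.join, PySem.Chars.join, List.intercalate]
  | [x] =>
      have hlt : j.toNat < l.length := by
        by_contra hc
        push Not at hc
        rw [List.drop_eq_nil_iff.mpr hc] at hd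
        exact (by simp at hd)
      have hlen : l.length = j.toNat + 1 := by
        have := congrArg List.length hd
        simp [List.length_drop] at this
        omega
      have hlast : j = PySem.List.len l - 1 := by
        simp [PySem.List.len, hlen]
        omega
      rw [PySem.List.enumerate_cons, PySem.List.enumerate_nil]
      simp only [List.flatMap_cons, List.flatMap_nil, List.append_nil]
      rw [pvGB_last l ci j x (pvMod_even hev) hlast]
      simp only [pvJoin_cons, pvJoin_singleton, pvJoin_nil, String.append_empty]
      simp only [pvChunk, String.append_assoc]
  | x :: y :: rest =>
      have hlen : l.length = j.toNat + 2 + rest.length := by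
        have := congrArg List.length hd
        simp [List.length_drop] at this
        omega
      have hnl : j ≠ PySem.List.len l - 1 := by
        simp only [PySem.List.len]
        omega
      have hd2 : l.drop (j + 2).toNat = rest := by
        have h4 := congrArg (List.drop 2) hd
        rw [List.drop_drop] at h4
        simp only [List.drop_succ_cons, List.drop_zero] at h4
        convert h4 using 2
        omega
      have ih := pvChunkB rest l ci (j + 2) (by omega) (by omega) hd2
      rw [PySem.List.enumerate_cons, PySem.List.enumerate_cons]
      simp only [List.flatMap_cons]
      rw [show j + 1 + 1 = j + 2 by ring]
      rw [pvGB_even l ci j x (pvMod_even hev) hnl, pvGB_odd l ci (j + 1) y (pvMod_odd hev)]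
      rw [pvJoin_append, pvJoin_append, ih]
      simp only [pvJoin_cons, pvJoin_singleton, pvJoin_nil, String.append_empty]
      simp only [pvChunk, String.append_assoc]
termination_by t.length

-- ===== VERDICT (by name: the statement is the Claim_ definition above) =====
theorem format_moves_display_spec : Claim_equal_format_moves_display := by
  intro l ci _
  unfold Spec_format_moves_display format_moves_display format_moves_display_alt
  rw [pvBodyA l ci, pvBodyB l ci]
  rw [pvFoldl_str, PySem.List.foldl_append_eq_flatMap]
  rw [pvChunkA l l ci 0 (by omega) (by simp)]
  rw [pvJoin_append, pvJoin_append, pvJoin_singleton, pvJoin_singleton]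
  rw [pvChunkB l l ci 0 (by omega) ⟨0, by ring⟩ (by simp)]
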